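-- pv_equiv track=rewrite | github.com/Devagar-edu/car-scan | validator.py | extract_model
-- ===== SOURCE A (Python) =====
-- MODEL_KEYWORDS = [
--     "Swift", "Baleno", "i20", "i10", "Creta", "Venue", "Verna", "City",
--     "Jazz", "Amaze", "WR-V", "Nexon", "Altroz", "Harrier", "Safari",
--     "Punch", "Tiago", "Tigor", "Dzire", "Ertiga", "Brezza", "Grand i10",
--     "Innova", "Fortuner", "Corolla", "Camry", "Yaris", "Glanza", "Urban Cruiser",
--     "Duster", "Kwid", "Triber", "Kiger", "Magnite", "S-Cross", "Ciaz",
--     "Polo", "Vento", "Taigun", "Virtus", "Seltos", "Sonet", "Carnival",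
--     "EcoSport", "Freestyle", "Figo", "Aspire", "Endeavour",
--     "XUV700", "XUV300", "Thar", "Scorpio", "Bolero", "Marazzo",
--     "Compass", "Meridian", "Meridian", "Xuv", "Omni",
--     "Alto", "WagonR", "Celerio", "S-Presso", "Ignis", "Eeco",
-- ]
--
-- def extract_model(title: str) -> str:
--     """Extract car model name from listing title."""
--     if not title:
--         return "Unknown"
--     title_lower = title.lower()
--     for model in sorted(MODEL_KEYWORDS, key=len, reverse=True):
--         if model.lower() in title_lower:
--             return model
--     # Fallback: take second word of title (often model name)
--     parts = title.strip().split()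
--     if len(parts) >= 2:
--         return parts[1]
--     return parts[0] if parts else "Unknown"
-- ===== SOURCE B (Python) =====
-- MODEL_KEYWORDS = [
--     "Swift", "Baleno", "i20", "i10", "Creta", "Venue", "Verna", "City",
--     "Jazz", "Amaze", "WR-V", "Nexon", "Altroz", "Harrier", "Safari",
--     "Punch", "Tiago", "Tigor", "Dzire", "Ertiga", "Brezza", "Grand i10",
--     "Innova", "Fortuner", "Corolla", "Camry", "Yaris", "Glanza", "Urban Cruiser",
--     "Duster", "Kwid", "Triber", "Kiger", "Magnite", "S-Cross", "Ciaz",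
--     "Polo", "Vento", "Taigun", "Virtus", "Seltos", "Sonet", "Carnival",
--     "EcoSport", "Freestyle", "Figo", "Aspire", "Endeavour",
--     "XUV700", "XUV300", "Thar", "Scorpio", "Bolero", "Marazzo",
--     "Compass", "Meridian", "Meridian", "Xuv", "Omni",
--     "Alto", "WagonR", "Celerio", "S-Presso", "Ignis", "Eeco",
-- ]
--
--
-- def extract_model(title: str) -> str:
--     """Extract car model name: filter matching keywords, then take the longest
--     (max with key=len returns the earliest-listed on ties, like A's stable sort)."""
--     if not title:
--         return "Unknown"
--     title_lower = title.lower()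
--     matches = [model for model in MODEL_KEYWORDS if model.lower() in title_lower]
--     if matches:
--         return max(matches, key=len)
--     parts = title.strip().split()
--     if not parts:
--         return "Unknown"
--     return parts[1] if len(parts) >= 2 else parts[0]
-- ===== Notes on version B (the rewrite author's own statement) =====
-- stated objective: alternative
-- what changed: B replaces A's per-call length-sort-then-first-match scan by a filter of the matching keywords followed by max(key=len), whose first-maximal rule reproduces the stable sort's tie-break; the fallback is restructured as an early empty-check plus a conditional expression.
import Mathlib
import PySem

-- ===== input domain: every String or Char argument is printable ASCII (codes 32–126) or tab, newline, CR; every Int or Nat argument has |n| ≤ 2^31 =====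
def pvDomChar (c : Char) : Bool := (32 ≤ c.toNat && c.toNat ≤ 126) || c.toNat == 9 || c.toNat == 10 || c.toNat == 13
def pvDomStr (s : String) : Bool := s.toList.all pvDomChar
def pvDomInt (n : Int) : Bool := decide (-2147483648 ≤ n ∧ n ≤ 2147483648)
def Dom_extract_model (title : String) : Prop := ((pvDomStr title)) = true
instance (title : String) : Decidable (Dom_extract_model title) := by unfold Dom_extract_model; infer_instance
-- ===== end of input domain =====

-- B replaces A's per-call length-sort-then-first-match scan by filtering the matching
-- keywords and taking max by length (first maximal wins ties, like the stable sort): alternative.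

def MODEL_KEYWORDS : List String := [
    "Swift", "Baleno", "i20", "i10", "Creta", "Venue", "Verna", "City",
    "Jazz", "Amaze", "WR-V", "Nexon", "Altroz", "Harrier", "Safari",
    "Punch", "Tiago", "Tigor", "Dzire", "Ertiga", "Brezza", "Grand i10",
    "Innova", "Fortuner", "Corolla", "Camry", "Yaris", "Glanza", "Urban Cruiser",
    "Duster", "Kwid", "Triber", "Kiger", "Magnite", "S-Cross", "Ciaz",
    "Polo", "Vento", "Taigun", "Virtus", "Seltos", "Sonet", "Carnival",
    "EcoSport", "Freestyle", "Figo", "Aspire", "Endeavour",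
    "XUV700", "XUV300", "Thar", "Scorpio", "Bolero", "Marazzo",
    "Compass", "Meridian", "Meridian", "Xuv", "Omni",
    "Alto", "WagonR", "Celerio", "S-Presso", "Ignis", "Eeco"]

-- ===== PORT A =====
def extract_model (title : String) : String :=
  if title = "" then "Unknown"
  else
    let title_lower := PySem.Str.lower title
    -- 'for model in sorted(MODEL_KEYWORDS, key=len, reverse=True): if …: return model'
    match (PySem.List.sorted MODEL_KEYWORDS (fun m => PySem.Str.len m) true).find?
        (fun model => PySem.Str.isIn (PySem.Str.lower model) title_lower) with
    | some model => model
    | none =>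
      let parts := PySem.Str.split₀ (PySem.Str.strip title)
      if 2 ≤ parts.length then PySem.List.pyGetD parts 1 ""
      else if parts ≠ [] then PySem.List.pyGetD parts 0 ""
      else "Unknown"

-- ===== PORT B =====
def extract_model_alt (title : String) : String :=
  if title = "" then "Unknown"
  else
    let title_lower := PySem.Str.lower title
    -- matches = [m for m in MODEL_KEYWORDS if m.lower() in title_lower]; max(matches, key=len)
    let matched := MODEL_KEYWORDS.filter
        (fun model => PySem.Str.isIn (PySem.Str.lower model) title_lower)
    match PySem.List.max? matched (fun m => PySem.Str.len m) with
    | some m => m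
    | none =>
      match PySem.Str.split₀ (PySem.Str.strip title) with
      | [] => "Unknown"
      | [w] => w
      | _ :: w :: _ => w

-- ===== PRECONDITION & SPEC =====
def Spec_extract_model (title : String) (out : String) : Prop := out = extract_model_alt title
instance (title : String) (out : String) : Decidable (Spec_extract_model title out) := by unfold Spec_extract_model; infer_instance

-- ===== CLAIM (what is proved, stated in full; the proofs are below) =====
def Claim_equal_extract_model : Prop := ∀ (title : String), Dom_extract_model title → Spec_extract_model title (extract_model title)

-- ===== LEMMAS AND PROOFS =====

/-- The running state of 'first match in the length-sorted list', expressed as a fold step. -/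
def pvStep (P : String → Bool) (key : String → Int) (best : Option String) (m : String) : Option String :=
  if P m then
    match best with
    | none => some m
    | some b => if key b < key m then some m else some b
  else best

theorem insertBy_cons (before : String → String → Bool) (x y : String) (ys : List String) :
    PySem.List.insertBy before x (y :: ys)
      = if before x y then x :: y :: ys else y :: PySem.List.insertBy before x ys := rfl

theorem pairwise_insertBy_desc (key : String → Int) (m : String) (L : List String)
    (hL : L.Pairwise (fun a b => key b ≤ key a)) :
    (PySem.List.insertBy (fun a b => decide (key b < key a)) m L).Pairwise
      (fun a b => key b ≤ key a) := by
  induction L with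
  | nil => simp [PySem.List.insertBy]
  | cons y ys ih =>
    rw [List.pairwise_cons] at hL
    rw [insertBy_cons]
    by_cases h : key y < key m
    · rw [if_pos (by simp [h])]
      refine List.Pairwise.cons ?_ (List.Pairwise.cons hL.1 hL.2)
      intro z hz
      rcases List.mem_cons.1 hz with rfl | hz
      · exact le_of_lt h
      · exact le_trans (hL.1 z hz) (le_of_lt h)
    · rw [if_neg (by simp [h])]
      refine List.Pairwise.cons ?_ (ih hL.2)
      intro z hz
      rcases (PySem.List.mem_insertBy _ _ _ _).1 hz with rfl | hz
      · exact le_of_not_gt h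
      · exact hL.1 z hz

theorem find?_insertBy (P : String → Bool) (key : String → Int) (m : String) (L : List String)
    (hL : L.Pairwise (fun a b => key b ≤ key a)) :
    (PySem.List.insertBy (fun a b => decide (key b < key a)) m L).find? P
      = pvStep P key (L.find? P) m := by
  induction L with
  | nil =>
    by_cases hm : P m <;> simp [PySem.List.insertBy, pvStep, List.find?, hm]
  | cons y ys ih =>
    rw [List.pairwise_cons] at hL
    rw [insertBy_cons]
    by_cases h : key y < key m
    · rw [if_pos (by simp [h])]
      by_cases hm : P m
      · rw [List.find?_cons_of_pos hm]
        rcases hf : (y :: ys).find? P with _ | b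
        · simp [pvStep, hm]
        · have hb : b ∈ y :: ys := List.mem_of_find?_eq_some hf
          have hbm : key b < key m := by
            rcases List.mem_cons.1 hb with rfl | hb
            · exact h
            · exact lt_of_le_of_lt (hL.1 b hb) h
          simp [pvStep, hm, hbm]
      · rw [List.find?_cons_of_neg hm]
        simp [pvStep, hm]
    · rw [if_neg (by simp [h])]
      by_cases hy : P y
      · rw [List.find?_cons_of_pos hy, List.find?_cons_of_pos hy]
        by_cases hm : P m <;> simp [pvStep, hm, h]
      · rw [List.find?_cons_of_neg hy, List.find?_cons_of_neg hy]
        exact ih hL.2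

theorem find?_foldl_insertBy (P : String → Bool) (key : String → Int) (K L : List String)
    (hL : L.Pairwise (fun a b => key b ≤ key a)) :
    ((K.foldl (fun acc x => PySem.List.insertBy (fun a b => decide (key b < key a)) x acc) L).find? P)
      = K.foldl (pvStep P key) (L.find? P) := by
  induction K generalizing L with
  | nil => rfl
  | cons m K ih =>
    simp only [List.foldl_cons]
    rw [ih _ (pairwise_insertBy_desc key m L hL), find?_insertBy P key m L hL]

/-- max? is the pvStep fold with the always-true predicate. -/
theorem max?_eq_foldl_pvStep (key : String → Int) (xs : List String) :
    PySem.List.max? xs key = xs.foldl (pvStep (fun _ => true) key) none := by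
  unfold PySem.List.max?
  congr 1
  funext acc x
  cases acc <;> simp [pvStep]

/-- Folding pvStep over the whole list equals folding it unconditionally over the filtered list. -/
theorem foldl_pvStep_eq_filter (P : String → Bool) (key : String → Int)
    (K : List String) (acc : Option String) :
    K.foldl (pvStep P key) acc = (K.filter P).foldl (pvStep (fun _ => true) key) acc := by
  induction K generalizing acc with
  | nil => rfl
  | cons m K ih =>
    by_cases hm : P m
    · simp only [List.foldl_cons, List.filter_cons_of_pos hm]
      rw [ih]
      rcases acc with _ | b <;> simp [pvStep, hm]
    · simp only [List.foldl_cons, List.filter_cons_of_neg hm]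
      rw [ih]
      simp [pvStep, hm]

-- ===== VERDICT (by name: the statement is the Claim_ definition above) =====
theorem extract_model_spec : Claim_equal_extract_model := by
  intro title _
  unfold Spec_extract_model extract_model extract_model_alt
  by_cases h : title = ""
  · simp [h]
  · simp only [if_neg h]
    rw [PySem.List.sorted_rev_eq_foldl_insertBy,
      find?_foldl_insertBy
        (fun model => PySem.Str.isIn (PySem.Str.lower model) (PySem.Str.lower title))
        (fun m => PySem.Str.len m) MODEL_KEYWORDS [] List.Pairwise.nil,
      List.find?_nil, foldl_pvStep_eq_filter, ← max?_eq_foldl_pvStep]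
    rcases hmax : PySem.List.max?
        (MODEL_KEYWORDS.filter (fun model => PySem.Str.isIn (PySem.Str.lower model) (PySem.Str.lower title)))
        (fun m => PySem.Str.len m) with _ | m
    · rcases hp : PySem.Str.split₀ (PySem.Str.strip title) with _ | ⟨w, _ | ⟨v, rest⟩⟩ <;>
        simp [PySem.List.pyGetD, PySem.List.pyGet?, PySem.List.pyIdx?]
    · rfl
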